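-- pv_equiv track=rewrite | github.com/asharma567/tinderoni | analysis_notebooks/image_helpers.py | _square_sizer
-- ===== SOURCE A (Python) =====
-- def _square_sizer(val):
--     for x, y in [(10,10), (6,6), (5,5),(4,4), (3, 3), (2,2), (2,1)]:
--         if val == (x * y):
--             return x, y
--         if val > x * y :
--             break
--     px, py = x, y
--     return px, py
-- ===== SOURCE B (Python) =====
-- def _square_sizer(val):
--     thresholds = [2, 4, 9, 16, 25, 36, 100]
--     pairs = [(2, 1), (2, 2), (3, 3), (4, 4), (5, 5), (6, 6), (10, 10)]
--     lo, hi = 0, len(thresholds)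
--     while lo < hi:
--         mid = (lo + hi) // 2
--         if thresholds[mid] <= val:
--             lo = mid + 1
--         else:
--             hi = mid
--     return pairs[max(lo - 1, 0)]
-- ===== Notes on version B (the rewrite author's own statement) =====
-- stated objective: alternative
-- what changed: Replaced the descending linear scan with early break by a hand-written binary search (bisect_right) over ascending parallel threshold/pair lists, returning the pair of the largest threshold <= val clamped to the smallest pair.
import Mathlib
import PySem

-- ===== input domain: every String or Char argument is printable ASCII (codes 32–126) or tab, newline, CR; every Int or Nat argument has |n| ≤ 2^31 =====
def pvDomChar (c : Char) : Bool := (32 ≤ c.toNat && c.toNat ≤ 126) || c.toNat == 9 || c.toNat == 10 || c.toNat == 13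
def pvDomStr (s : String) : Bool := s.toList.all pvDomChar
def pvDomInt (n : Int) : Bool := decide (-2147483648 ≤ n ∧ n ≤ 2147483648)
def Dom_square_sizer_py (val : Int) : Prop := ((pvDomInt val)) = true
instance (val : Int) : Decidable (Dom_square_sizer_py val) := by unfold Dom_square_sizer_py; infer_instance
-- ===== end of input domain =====

-- B replaces A's descending linear scan with a binary search over ascending parallel lists; alternative structure, same result.

-- ===== PORT A =====
-- the for-loop with early return/break, carrying the current (x, y); after the loop the last pair is returned
def pvALoop (val : Int) : List (Int × Int) → Int × Int → Int × Int
  | [], xy => xy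
  | (x, y) :: rest, _ =>
    if val = x * y then (x, y)
    else if val > x * y then (x, y)
    else pvALoop val rest (x, y)

def square_sizer_py (val : Int) : Int × Int :=
  pvALoop val [(10,10), (6,6), (5,5), (4,4), (3,3), (2,2), (2,1)] (0, 0)

-- ===== PORT B =====
-- the while lo < hi binary-search loop of Source B (lo, hi are nonnegative Python ints)
def pvBsearch (val : Int) (ths : List Int) (lo hi : Nat) : Nat :=
  if lo < hi then
    let mid := (lo + hi) / 2
    if ths.getD mid 0 ≤ val then pvBsearch val ths (mid + 1) hi
    else pvBsearch val ths lo mid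
  else lo
termination_by hi - lo
decreasing_by all_goals omega

def square_sizer_py_alt (val : Int) : Int × Int :=
  let thresholds : List Int := [2, 4, 9, 16, 25, 36, 100]
  let pairs : List (Int × Int) := [(2,1), (2,2), (3,3), (4,4), (5,5), (6,6), (10,10)]
  let lo := pvBsearch val thresholds 0 thresholds.length
  pairs.getD (lo - 1) (2, 1)   -- Nat subtraction 0-1=0 matches Python's max(lo-1, 0)

-- ===== PRECONDITION & SPEC =====
def Spec_square_sizer_py (val : Int) (out : Int × Int) : Prop := out = square_sizer_py_alt val
instance (val : Int) (out : Int × Int) : Decidable (Spec_square_sizer_py val out) := by unfold Spec_square_sizer_py; infer_instance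

-- ===== CLAIM (what is proved, stated in full; the proofs are below) =====
def Claim_equal_square_sizer_py : Prop := ∀ (val : Int), Dom_square_sizer_py val → Spec_square_sizer_py val (square_sizer_py val)

-- ===== LEMMAS AND PROOFS =====
theorem pv_bs_step (val : Int) (ths : List Int) (lo hi : Nat) (h : lo < hi) :
    pvBsearch val ths lo hi =
      if ths.getD ((lo + hi) / 2) 0 ≤ val then pvBsearch val ths ((lo + hi) / 2 + 1) hi
      else pvBsearch val ths lo ((lo + hi) / 2) := by
  rw [pvBsearch]; simp [h]

theorem pv_bs_done (val : Int) (ths : List Int) (lo : Nat) : pvBsearch val ths lo lo = lo := by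
  rw [pvBsearch]; simp

-- closed form of the binary search on the concrete threshold list
theorem pv_bs_eval (val : Int) :
    pvBsearch val [2, 4, 9, 16, 25, 36, 100] 0 7 =
      if 100 ≤ val then 7 else if 36 ≤ val then 6 else if 25 ≤ val then 5
      else if 16 ≤ val then 4 else if 9 ≤ val then 3 else if 4 ≤ val then 2
      else if 2 ≤ val then 1 else 0 := by
  rw [pv_bs_step _ _ _ _ (by norm_num)]
  norm_num [List.getD]
  by_cases h16 : (16 : Int) ≤ val
  · rw [if_pos h16, pv_bs_step _ _ _ _ (by norm_num)]
    norm_num [List.getD]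
    by_cases h36 : (36 : Int) ≤ val
    · rw [if_pos h36, pv_bs_step _ _ _ _ (by norm_num)]
      norm_num [List.getD]
      by_cases h100 : (100 : Int) ≤ val
      · rw [if_pos h100, pv_bs_done]
        simp [h100]
      · rw [if_neg h100, pv_bs_done]
        simp [h100, h36]
    · rw [if_neg h36, pv_bs_step _ _ _ _ (by norm_num)]
      norm_num [List.getD]
      by_cases h25 : (25 : Int) ≤ val
      · rw [if_pos h25, pv_bs_done]
        have : ¬ (100 : Int) ≤ val := by omega
        simp [this, h36, h25]
      · rw [if_neg h25, pv_bs_done]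
        have : ¬ (100 : Int) ≤ val := by omega
        simp [this, h36, h25, h16]
  · rw [if_neg h16, pv_bs_step _ _ _ _ (by norm_num)]
    norm_num [List.getD]
    by_cases h4 : (4 : Int) ≤ val
    · rw [if_pos h4, pv_bs_step _ _ _ _ (by norm_num)]
      norm_num [List.getD]
      by_cases h9 : (9 : Int) ≤ val
      · rw [if_pos h9, pv_bs_done]
        have h1 : ¬ (100 : Int) ≤ val := by omega
        have h2 : ¬ (36 : Int) ≤ val := by omega
        have h3 : ¬ (25 : Int) ≤ val := by omega
        simp [h1, h2, h3, h16, h9]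
      · rw [if_neg h9, pv_bs_done]
        have h1 : ¬ (100 : Int) ≤ val := by omega
        have h2 : ¬ (36 : Int) ≤ val := by omega
        have h3 : ¬ (25 : Int) ≤ val := by omega
        simp [h1, h2, h3, h16, h9, h4]
    · rw [if_neg h4, pv_bs_step _ _ _ _ (by norm_num)]
      norm_num [List.getD]
      by_cases h2 : (2 : Int) ≤ val
      · rw [if_pos h2, pv_bs_done]
        have h1 : ¬ (100 : Int) ≤ val := by omega
        have hb : ¬ (36 : Int) ≤ val := by omega
        have hc : ¬ (25 : Int) ≤ val := by omega
        have hd : ¬ (9 : Int) ≤ val := by omega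
        simp [h1, hb, hc, hd, h16, h4, h2]
      · rw [if_neg h2, pv_bs_done]
        have h1 : ¬ (100 : Int) ≤ val := by omega
        have hb : ¬ (36 : Int) ≤ val := by omega
        have hc : ¬ (25 : Int) ≤ val := by omega
        have hd : ¬ (9 : Int) ≤ val := by omega
        simp [h1, hb, hc, hd, h16, h4, h2]

-- closed form of A's descending scan
set_option maxHeartbeats 1000000 in
theorem pv_a_eval (val : Int) :
    square_sizer_py val =
      if 100 ≤ val then (10, 10) else if 36 ≤ val then (6, 6) else if 25 ≤ val then (5, 5)
      else if 16 ≤ val then (4, 4) else if 9 ≤ val then (3, 3) else if 4 ≤ val then (2, 2)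
      else if 2 ≤ val then (2, 1) else (2, 1) := by
  unfold square_sizer_py
  simp only [pvALoop]
  norm_num
  split_ifs <;> first | rfl | omega

-- ===== VERDICT (by name: the statement is the Claim_ definition above) =====
set_option maxHeartbeats 1000000 in
theorem square_sizer_py_spec : Claim_equal_square_sizer_py := by
  intro val _
  unfold Spec_square_sizer_py square_sizer_py_alt
  rw [pv_a_eval]
  norm_num [pv_bs_eval]
  split_ifs <;> simp
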